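-- pv_equiv track=rewrite | github.com/ryeongse25/algorithm | 프로그래머스/unrated/181918. 배열 만들기 4/배열 만들기 4.py | solution
-- ===== SOURCE A (Python) =====
-- def solution(arr):
--     i = 0
--     stk = []
--
--     while i < len(arr):
--         if not stk or stk[-1] < arr[i]:
--             stk.append(arr[i])
--             i += 1
--         else:
--             stk.pop()
--
--
--     return stk
-- ===== SOURCE B (Python) =====
-- def solution(arr):
--     # The surviving elements are exactly those strictly smaller than every
--     # element to their right: one backward pass with a running minimum, no stack.
--     out = []
--     m = None
--     for x in reversed(arr):
--         if m is None or x < m: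
--             out.append(x)
--             m = x
--     out.reverse()
--     return out
-- ===== Notes on version B (the rewrite author's own statement) =====
-- stated objective: faster
-- what changed: Replaces the stack-with-pops process by a stackless backward pass: an element survives iff it is strictly smaller than the running minimum of the elements to its right, so B scans reversed(arr) keeping strict new minima and reverses the result; no pops means at most n loop iterations instead of up to 2n.
import Mathlib
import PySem

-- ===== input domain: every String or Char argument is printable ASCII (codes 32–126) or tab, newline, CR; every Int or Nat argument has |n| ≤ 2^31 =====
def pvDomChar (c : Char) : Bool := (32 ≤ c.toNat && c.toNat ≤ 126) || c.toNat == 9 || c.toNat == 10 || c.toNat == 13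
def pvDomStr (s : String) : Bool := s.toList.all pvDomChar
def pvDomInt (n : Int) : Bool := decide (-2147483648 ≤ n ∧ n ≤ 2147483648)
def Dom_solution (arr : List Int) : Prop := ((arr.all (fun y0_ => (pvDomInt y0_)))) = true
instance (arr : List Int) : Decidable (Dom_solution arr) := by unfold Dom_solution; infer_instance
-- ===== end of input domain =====

-- B drops A's stack entirely: one backward pass keeping each element strictly smaller
-- than the running minimum of the elements to its right; objective: faster (constant factor, measured).


-- ===== PORT A =====
-- A's while loop with state (i, stk); stk is kept head-first (head = Python stk[-1]),
-- so the returned list is reversed at the end. Termination: push consumes an index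
-- (i += 1), pop shrinks the stack, measured by 2*(len-i) + len stk.
def solutionAuxA (arr : List Int) (i : Nat) (stk : List Int) : List Int :=
  if h : i < arr.length then
    match stk with
    | [] => solutionAuxA arr (i+1) [arr[i]]
    | t :: rest =>
        if t < arr[i] then solutionAuxA arr (i+1) (arr[i] :: t :: rest)
        else solutionAuxA arr i rest
  else stk
termination_by 2 * (arr.length - i) + stk.length
decreasing_by all_goals · simp only [List.length]; omega

def solution (arr : List Int) : List Int := (solutionAuxA arr 0 []).reverse

-- ===== PORT B =====
-- `for x in reversed(arr): if m is None or x < m: out.append(x); m = x`, then out.reverse()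
def bLoop : List Int → Option Int → List Int → List Int
  | [], _, out => out
  | x :: rest, m, out =>
      if (match m with | none => true | some v => decide (x < v)) then
        bLoop rest (some x) (out ++ [x])
      else bLoop rest m out

def solution_alt (arr : List Int) : List Int := (bLoop arr.reverse none []).reverse

-- ===== PRECONDITION & SPEC =====
def Spec_solution (arr : List Int) (out : List Int) : Prop := out = solution_alt arr
instance (arr : List Int) (out : List Int) : Decidable (Spec_solution arr out) := by unfold Spec_solution; infer_instance

-- ===== CLAIM (what is proved, stated in full; the proofs are below) =====
def Claim_equal_solution : Prop := ∀ (arr : List Int), Dom_solution arr → Spec_solution arr (solution arr)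

-- ===== LEMMAS AND PROOFS =====

-- Proof-only view of A's pop phase: drop tops ≥ x.
def popGE (x : Int) : List Int → List Int
  | [] => []
  | t :: rest => if t ≥ x then popGE x rest else t :: rest

def stkOf (arr : List Int) : List Int := arr.foldl (fun stk x => x :: popGE x stk) []

-- One element's worth of A's loop iterations equals one pop-then-push step.
theorem auxA_step (arr : List Int) (i : Nat) (h : i < arr.length) :
    ∀ stk : List Int, solutionAuxA arr i stk = solutionAuxA arr (i+1) (arr[i] :: popGE arr[i] stk) := by
  intro stk
  induction stk with
  | nil => rw [solutionAuxA]; simp [h, popGE]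
  | cons t rest ih =>
      rw [solutionAuxA]
      simp only [h, dif_pos]
      by_cases hlt : t < arr[i]
      · simp [hlt, popGE, not_le.mpr hlt]
      · simp only [if_neg hlt, popGE, if_pos (not_lt.mp hlt), ih]

theorem auxA_foldl (arr : List Int) (i : Nat) (stk : List Int) :
    solutionAuxA arr i stk = (arr.drop i).foldl (fun stk x => x :: popGE x stk) stk := by
  by_cases h : i < arr.length
  · rw [auxA_step arr i h, List.drop_eq_getElem_cons h]
    exact auxA_foldl arr (i+1) (arr[i] :: popGE arr[i] stk)
  · rw [solutionAuxA]
    simp [h, List.drop_eq_nil_of_le (not_lt.mp h)]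
termination_by arr.length - i
decreasing_by omega

theorem popGE_popGE (v x : Int) (hvx : v ≤ x) (s : List Int) :
    popGE v (popGE x s) = popGE v s := by
  induction s with
  | nil => rfl
  | cons t r ih =>
      by_cases ht : t ≥ x
      · simp only [popGE, if_pos ht, if_pos (le_trans hvx ht), ih]
      · simp only [popGE, if_neg ht]

def keepM : Option Int → List Int → List Int
  | none, s => s
  | some v, s => popGE v s

-- B's backward scan with running minimum m returns, appended to out, exactly the
-- part of A's stack below m.
theorem bLoop_eq (arr : List Int) : ∀ (m : Option Int) (out : List Int),
    bLoop arr.reverse m out = out ++ keepM m (stkOf arr) := by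
  induction arr using List.reverseRecOn with
  | nil => intro m out; cases m <;> simp [bLoop, keepM, stkOf, popGE]
  | append_singleton l x ih =>
      intro m out
      have hst : stkOf (l ++ [x]) = x :: popGE x (stkOf l) := by
        simp [stkOf, List.foldl_append]
      rw [List.reverse_append]
      simp only [List.reverse_singleton, List.singleton_append, bLoop]
      cases m with
      | none =>
          simp only [ih, hst, keepM]
          simp
      | some v =>
          by_cases hx : x < v
          · simp only [decide_eq_true hx, if_pos, ih, hst, keepM, popGE,
              if_neg (not_le.mpr hx)]
            simp
          · have hvx : v ≤ x := not_lt.mp hx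
            simp only [decide_eq_false hx, Bool.false_eq_true, if_false, ih, hst, keepM, popGE,
              if_pos hvx, popGE_popGE v x hvx]

-- ===== VERDICT (by name: the statement is the Claim_ definition above) =====
theorem solution_spec : Claim_equal_solution := by
  intro arr _
  unfold Spec_solution solution solution_alt
  rw [auxA_foldl, bLoop_eq arr none []]
  rfl
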